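-- pv_equiv track=rewrite | github.com/dece/AdventOfCode | 2020/day22.py | rec_game
-- ===== SOURCE A (Python) =====
-- def rec_game(deck1, deck2):
--     past_decks = set()
--     while deck1 and deck2:
--         h = tuple(deck1), tuple(deck2)
--         if h in past_decks:
--             return 1
--         past_decks.add(h)
--         c1, c2 = deck1.pop(0), deck2.pop(0)
--         if len(deck1) >= c1 and len(deck2) >= c2:
--             if rec_game(deck1[:c1], deck2[:c2]) == 1:
--                 deck1 += [c1, c2]
--             else:
--                 deck2 += [c2, c1]
--         elif c1 > c2:
--             deck1 += [c1, c2]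
--         else:
--             deck2 += [c2, c1]
--     return 1 if deck1 else 2
-- ===== SOURCE B (Python) =====
-- # B: plays the same Recursive Combat game on a growing array with head pointers
-- # (O(1) draw/append instead of A's O(n) pop(0)); returns the same winner and,
-- # unlike A, does not mutate the caller's lists (return-value equivalence).
-- def rec_game(deck1, deck2):
--     return _play(deck1[:], deck2[:])
--
-- def _play(l1, l2):
--     i1 = i2 = 0
--     seen = set()
--     while i1 < len(l1) and i2 < len(l2):
--         state = (tuple(l1[i1:]), tuple(l2[i2:]))
--         if state in seen:
--             return 1
--         seen.add(state)
--         c1 = l1[i1]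
--         c2 = l2[i2]
--         i1 += 1
--         i2 += 1
--         if len(l1) - i1 >= c1 and len(l2) - i2 >= c2:
--             p1_wins = _play(l1[i1:][:c1], l2[i2:][:c2]) == 1
--         else:
--             p1_wins = c1 > c2
--         if p1_wins:
--             l1.append(c1)
--             l1.append(c2)
--         else:
--             l2.append(c2)
--             l2.append(c1)
--     return 1 if i1 < len(l1) else 2
-- ===== Notes on version B (the rewrite author's own statement) =====
-- stated objective: alternative
-- what changed: A mutates two lists with O(n) pop(0) and copies deck slices per round; B plays the same game on growing arrays with head pointers (O(1) draw and append per round) and merges the three-way branch into a single p1_wins decision; B also does not mutate the caller's lists.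
import Mathlib
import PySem

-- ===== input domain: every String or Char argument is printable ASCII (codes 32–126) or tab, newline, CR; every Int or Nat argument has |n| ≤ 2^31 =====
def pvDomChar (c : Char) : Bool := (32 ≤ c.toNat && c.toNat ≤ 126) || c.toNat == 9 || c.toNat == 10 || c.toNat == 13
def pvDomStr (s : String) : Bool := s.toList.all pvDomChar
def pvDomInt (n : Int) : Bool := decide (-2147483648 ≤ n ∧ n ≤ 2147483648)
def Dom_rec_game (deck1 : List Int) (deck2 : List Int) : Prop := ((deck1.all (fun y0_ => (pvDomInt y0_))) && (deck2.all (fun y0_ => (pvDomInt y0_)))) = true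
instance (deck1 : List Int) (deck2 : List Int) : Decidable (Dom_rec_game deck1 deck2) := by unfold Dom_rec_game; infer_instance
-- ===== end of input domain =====

-- B re-implements the game on growing arrays with head pointers (O(1) draw/append
-- instead of A's O(n) pop(0) and per-round deck rebuilding); equivalence is about the
-- RETURN value only: the Python A mutates its list arguments in place, B does not.

-- ---- small arithmetic/length facts cited by the ports' termination proofs ----
-- (kept as named theorems with tiny proofs; the recursive bodies just cite them)
lemma pvSliceToLen (xs : List Int) (b : Int) :
    (PySem.List.slice xs none (some b)).length ≤ xs.length := by
  rw [← PySem.List.slice_zero_start, PySem.List.length_slice]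
  exact Nat.le_trans (Nat.sub_le _ _) (PySem.List.clampIdx_le xs.length b)

theorem pvDecSubA (c1 c2 : Int) (t1 t2 : List Int) :
    (PySem.List.slice t1 none (some c1)).length + (PySem.List.slice t2 none (some c2)).length <
      (c1 :: t1).length + (c2 :: t2).length :=
  Nat.lt_of_le_of_lt (Nat.add_le_add (pvSliceToLen t1 c1) (pvSliceToLen t2 c2))
    (Nat.add_lt_add (Nat.lt_succ_self _) (Nat.lt_succ_self _))

theorem pvLenWinA (c1 c2 : Int) (t1 t2 : List Int) :
    (t1 ++ [c1, c2]).length + t2.length = (c1 :: t1).length + (c2 :: t2).length := by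
  rw [List.length_append]
  exact (Nat.succ_add (t1.length + 1) t2.length).trans
    (Nat.add_succ (t1.length + 1) t2.length).symm

theorem pvLenLoseA (c1 c2 : Int) (t1 t2 : List Int) :
    t1.length + (t2 ++ [c2, c1]).length = (c1 :: t1).length + (c2 :: t2).length := by
  rw [List.length_append]
  exact (Nat.add_succ t1.length (t2.length + 1)).trans
    (Nat.succ_add t1.length (t2.length + 1)).symm

theorem pvDecSubB (l1 l2 : List Int) (i1 i2 : Nat) (c1 c2 : Int)
    (h1 : i1 < l1.length) (h2 : i2 < l2.length) :
    (PySem.List.slice (l1.drop (i1 + 1)) none (some c1)).length +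
        (PySem.List.slice (l2.drop (i2 + 1)) none (some c2)).length <
      (l1.length - i1) + (l2.length - i2) := by
  have b1 := pvSliceToLen (l1.drop (i1 + 1)) c1
  have b2 := pvSliceToLen (l2.drop (i2 + 1)) c2
  rw [List.length_drop, ← Nat.sub_sub] at b1
  rw [List.length_drop, ← Nat.sub_sub] at b2
  exact Nat.lt_of_le_of_lt (Nat.add_le_add b1 b2)
    (Nat.add_lt_add (Nat.sub_lt (Nat.zero_lt_sub_of_lt h1) Nat.one_pos)
      (Nat.sub_lt (Nat.zero_lt_sub_of_lt h2) Nat.one_pos))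

theorem pvLenWinB (l1 l2 : List Int) (x y : Int) (i1 i2 : Nat)
    (h1 : i1 < l1.length) (h2 : i2 < l2.length) :
    (l1 ++ [x, y]).length - (i1 + 1) + (l2.length - (i2 + 1)) =
      (l1.length - i1) + (l2.length - i2) := by
  rw [List.length_append]
  show l1.length + 2 - (i1 + 1) + (l2.length - (i2 + 1)) = (l1.length - i1) + (l2.length - i2)
  have e1 : (l1.length + 2) - (i1 + 1) = (l1.length - i1) + 1 :=
    (Nat.succ_sub_succ (l1.length + 1) i1).trans (Nat.succ_sub (Nat.le_of_lt h1))
  have e2 : l2.length - (i2 + 1) = (l2.length - i2) - 1 := (Nat.sub_sub l2.length i2 1).symm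
  rw [e1, e2]
  exact ((Nat.succ_add (l1.length - i1) ((l2.length - i2) - 1)).trans
      (Nat.add_assoc (l1.length - i1) ((l2.length - i2) - 1) 1)).trans
    (congrArg (fun z => (l1.length - i1) + z) (Nat.succ_pred_eq_of_pos (show 0 < l2.length - i2 from Nat.zero_lt_sub_of_lt h2)))

theorem pvLenLoseB (l1 l2 : List Int) (x y : Int) (i1 i2 : Nat)
    (h1 : i1 < l1.length) (h2 : i2 < l2.length) :
    l1.length - (i1 + 1) + ((l2 ++ [x, y]).length - (i2 + 1)) =
      (l1.length - i1) + (l2.length - i2) := by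
  rw [List.length_append]
  show l1.length - (i1 + 1) + (l2.length + 2 - (i2 + 1)) = (l1.length - i1) + (l2.length - i2)
  have e1 : l1.length - (i1 + 1) = (l1.length - i1) - 1 := (Nat.sub_sub l1.length i1 1).symm
  have e2 : (l2.length + 2) - (i2 + 1) = (l2.length - i2) + 1 :=
    (Nat.succ_sub_succ (l2.length + 1) i2).trans (Nat.succ_sub (Nat.le_of_lt h2))
  rw [e1, e2]
  exact ((Nat.add_succ ((l1.length - i1) - 1) (l2.length - i2)).trans
      (Nat.add_right_comm ((l1.length - i1) - 1) (l2.length - i2) 1)).trans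
    (congrArg (fun z => z + (l2.length - i2))
      (Nat.succ_pred_eq_of_pos (show 0 < l1.length - i1 from Nat.zero_lt_sub_of_lt h1)))

-- fuel recomputed at each (sub)game entry: (n+1)^(n+2) where n = total cards; this
-- exceeds the number of distinct deck states and each round records a fresh state,
-- so the 0-fuel branch only makes the recursion well-founded
def pvFuel (d1 d2 : List Int) : Nat :=
  (d1.length + d2.length + 1) ^ (d1.length + d2.length + 2)
-- ===== PORT A ===== (literal port of Source A; past_decks is a PySem.Set)
def recLoop (fuel : Nat) (d1 d2 : List Int) (past : List (List Int × List Int)) : Int :=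
  match fuel with
  | 0 => 2
  | fuel + 1 =>
    match d1, d2 with
    | [], _ => 2
    | _ :: _, [] => 1
    | c1 :: t1, c2 :: t2 =>
      if (c1 :: t1, c2 :: t2) ∈ past then 1
      else
        if c1 ≤ (t1.length : Int) ∧ c2 ≤ (t2.length : Int) then
          if recLoop (pvFuel (PySem.List.slice t1 none (some c1)) (PySem.List.slice t2 none (some c2)))
              (PySem.List.slice t1 none (some c1)) (PySem.List.slice t2 none (some c2)) [] = 1 then
            recLoop fuel (t1 ++ [c1, c2]) t2 (PySem.Set.add past (c1 :: t1, c2 :: t2))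
          else
            recLoop fuel t1 (t2 ++ [c2, c1]) (PySem.Set.add past (c1 :: t1, c2 :: t2))
        else if c2 < c1 then
          recLoop fuel (t1 ++ [c1, c2]) t2 (PySem.Set.add past (c1 :: t1, c2 :: t2))
        else
          recLoop fuel t1 (t2 ++ [c2, c1]) (PySem.Set.add past (c1 :: t1, c2 :: t2))
termination_by (d1.length + d2.length, fuel)
decreasing_by
  · exact Prod.Lex.left _ _ (pvDecSubA c1 c2 t1 t2)
  · rw [pvLenWinA c1 c2 t1 t2]; exact Prod.Lex.right _ (Nat.lt_succ_self fuel)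
  · rw [pvLenLoseA c1 c2 t1 t2]; exact Prod.Lex.right _ (Nat.lt_succ_self fuel)
  · rw [pvLenWinA c1 c2 t1 t2]; exact Prod.Lex.right _ (Nat.lt_succ_self fuel)
  · rw [pvLenLoseA c1 c2 t1 t2]; exact Prod.Lex.right _ (Nat.lt_succ_self fuel)

def rec_game (deck1 : List Int) (deck2 : List Int) : Int :=
  recLoop (pvFuel deck1 deck2) deck1 deck2 PySem.Set.empty

-- ===== PORT B ===== (literal port of Source B: growing lists with head pointers i1, i2;
-- the indices are Nat — they start at 0 and only grow, so l[i:] is List.drop i exactly)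
def altLoop (fuel : Nat) (l1 l2 : List Int) (i1 i2 : Nat)
    (seen : List (List Int × List Int)) : Int :=
  match fuel with
  | 0 => 2
  | fuel + 1 =>
    if h1 : i1 < l1.length then
      if h2 : i2 < l2.length then
        if (l1.drop i1, l2.drop i2) ∈ seen then 1
        else
          let c1 := l1[i1]
          let c2 := l2[i2]
          let p1Wins : Bool :=
            if c1 ≤ (l1.length : Int) - (i1 + 1) ∧ c2 ≤ (l2.length : Int) - (i2 + 1) then
              altLoop
                (pvFuel (PySem.List.slice (l1.drop (i1 + 1)) none (some c1))
                  (PySem.List.slice (l2.drop (i2 + 1)) none (some c2)))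
                (PySem.List.slice (l1.drop (i1 + 1)) none (some c1))
                (PySem.List.slice (l2.drop (i2 + 1)) none (some c2)) 0 0 [] == 1
            else decide (c2 < c1)
          if p1Wins then
            altLoop fuel (l1 ++ [c1, c2]) l2 (i1 + 1) (i2 + 1)
              (PySem.Set.add seen (l1.drop i1, l2.drop i2))
          else
            altLoop fuel l1 (l2 ++ [c2, c1]) (i1 + 1) (i2 + 1)
              (PySem.Set.add seen (l1.drop i1, l2.drop i2))
      else if i1 < l1.length then 1 else 2
    else if i1 < l1.length then 1 else 2
termination_by ((l1.length - i1) + (l2.length - i2), fuel)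
decreasing_by
  · exact Prod.Lex.left _ _ (pvDecSubB l1 l2 i1 i2 c1 c2 h1 h2)
  · rw [pvLenWinB l1 l2 c1 c2 i1 i2 h1 h2]; exact Prod.Lex.right _ (Nat.lt_succ_self fuel)
  · rw [pvLenLoseB l1 l2 c2 c1 i1 i2 h1 h2]; exact Prod.Lex.right _ (Nat.lt_succ_self fuel)

def rec_game_alt (deck1 : List Int) (deck2 : List Int) : Int :=
  altLoop (pvFuel deck1 deck2) deck1 deck2 0 0 PySem.Set.empty

-- ===== PRECONDITION & SPEC =====
def Spec_rec_game (deck1 : List Int) (deck2 : List Int) (out : Int) : Prop := out = rec_game_alt deck1 deck2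
instance (deck1 : List Int) (deck2 : List Int) (out : Int) : Decidable (Spec_rec_game deck1 deck2 out) := by unfold Spec_rec_game; infer_instance

-- ===== CLAIM (what is proved, stated in full; the proofs are below) =====
def Claim_equal_rec_game : Prop := ∀ (deck1 : List Int) (deck2 : List Int), Dom_rec_game deck1 deck2 → Spec_rec_game deck1 deck2 (rec_game deck1 deck2)

-- ===== LEMMAS AND PROOFS =====
-- the two loops run in lockstep: A's decks are exactly B's lists from the head
-- pointers on (d1 = l1[i1:], d2 = l2[i2:]) and both record the same states, so with
-- equal fuel they return the same winner (nested induction: total cards, then fuel)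
lemma pvAgree (N : Nat) : ∀ (fuel : Nat) (d1 d2 : List Int)
    (seen : List (List Int × List Int)) (l1 l2 : List Int) (i1 i2 : Nat),
    d1 = l1.drop i1 → d2 = l2.drop i2 → d1.length + d2.length ≤ N →
    recLoop fuel d1 d2 seen = altLoop fuel l1 l2 i1 i2 seen := by
  induction N using Nat.strong_induction_on with
  | _ N ihN =>
  intro fuel
  induction fuel with
  | zero => intro d1 d2 seen l1 l2 i1 i2 e1 e2 hN; rw [recLoop, altLoop]
  | succ fuel ihF =>
  intro d1 d2 seen l1 l2 i1 i2 e1 e2 hN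
  match d1, d2 with
  | [], d2 =>
      rw [recLoop, altLoop]
      have h1 : ¬ i1 < l1.length := by
        have := congrArg List.length e1; simp at this; omega
      rw [dif_neg h1, if_neg (by omega)]
  | c1 :: t1, [] =>
      rw [recLoop, altLoop]
      have h1 : i1 < l1.length := by
        have := congrArg List.length e1; simp at this; omega
      have h2 : ¬ i2 < l2.length := by
        have := congrArg List.length e2; simp at this; omega
      rw [dif_pos h1, dif_neg h2, if_pos h1]
  | c1 :: t1, c2 :: t2 =>
      have h1 : i1 < l1.length := by
        have := congrArg List.length e1; simp at this; omega
      have h2 : i2 < l2.length := by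
        have := congrArg List.length e2; simp at this; omega
      have hd1 := e1.trans (List.drop_eq_getElem_cons h1)
      have hd2 := e2.trans (List.drop_eq_getElem_cons h2)
      have hc1 : c1 = l1[i1] := by injection hd1
      have ht1 : t1 = l1.drop (i1 + 1) := by injection hd1
      have hc2 : c2 = l2[i2] := by injection hd2
      have ht2 : t2 = l2.drop (i2 + 1) := by injection hd2
      subst hc1 ht1 hc2 ht2
      rw [List.length_cons, List.length_cons] at hN
      rw [List.length_drop, List.length_drop] at hN
      have est : (l1[i1] :: l1.drop (i1 + 1), l2[i2] :: l2.drop (i2 + 1)) =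
          (l1.drop i1, l2.drop i2) := by
        rw [List.drop_eq_getElem_cons h1, List.drop_eq_getElem_cons h2]
      rw [recLoop, altLoop, dif_pos h1, dif_pos h2, est]
      by_cases hm : (l1.drop i1, l2.drop i2) ∈ seen
      · rw [if_pos hm, if_pos hm]
      rw [if_neg hm, if_neg hm]
      -- the two possible next rounds
      have hwin : recLoop fuel (l1.drop (i1 + 1) ++ [l1[i1], l2[i2]]) (l2.drop (i2 + 1))
            (PySem.Set.add seen (l1.drop i1, l2.drop i2)) =
          altLoop fuel (l1 ++ [l1[i1], l2[i2]]) l2 (i1 + 1) (i2 + 1)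
            (PySem.Set.add seen (l1.drop i1, l2.drop i2)) := by
        refine ihF _ _ _ (l1 ++ [l1[i1], l2[i2]]) l2 (i1 + 1) (i2 + 1)
          (by rw [List.drop_append_of_le_length (by omega)]) rfl ?_
        simp only [List.length_append, List.length_drop, List.length_cons, List.length_nil]
        omega
      have hlose : recLoop fuel (l1.drop (i1 + 1)) (l2.drop (i2 + 1) ++ [l2[i2], l1[i1]])
            (PySem.Set.add seen (l1.drop i1, l2.drop i2)) =
          altLoop fuel l1 (l2 ++ [l2[i2], l1[i1]]) (i1 + 1) (i2 + 1)
            (PySem.Set.add seen (l1.drop i1, l2.drop i2)) := by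
        refine ihF _ _ _ l1 (l2 ++ [l2[i2], l1[i1]]) (i1 + 1) (i2 + 1)
          rfl (by rw [List.drop_append_of_le_length (by omega)]) ?_
        simp only [List.length_append, List.length_drop, List.length_cons, List.length_nil]
        omega
      -- guard
      have hcond : (l1[i1] ≤ ((l1.drop (i1 + 1)).length : Int) ∧
            l2[i2] ≤ ((l2.drop (i2 + 1)).length : Int)) ↔
          (l1[i1] ≤ (l1.length : Int) - (↑i1 + 1) ∧ l2[i2] ≤ (l2.length : Int) - (↑i2 + 1)) := by
        simp only [List.length_drop]
        omega
      simp only []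
      by_cases hg : l1[i1] ≤ (l1.length : Int) - (↑i1 + 1) ∧ l2[i2] ≤ (l2.length : Int) - (↑i2 + 1)
      · rw [if_pos (hcond.mpr hg), if_pos hg]
        have hsub : recLoop
              (pvFuel (PySem.List.slice (l1.drop (i1 + 1)) none (some l1[i1]))
                (PySem.List.slice (l2.drop (i2 + 1)) none (some l2[i2])))
              (PySem.List.slice (l1.drop (i1 + 1)) none (some l1[i1]))
              (PySem.List.slice (l2.drop (i2 + 1)) none (some l2[i2])) [] =
            altLoop
              (pvFuel (PySem.List.slice (l1.drop (i1 + 1)) none (some l1[i1]))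
                (PySem.List.slice (l2.drop (i2 + 1)) none (some l2[i2])))
              (PySem.List.slice (l1.drop (i1 + 1)) none (some l1[i1]))
              (PySem.List.slice (l2.drop (i2 + 1)) none (some l2[i2])) 0 0 [] := by
          refine ihN (N - 1) ?_ _ _ _ _ _ _ 0 0 List.drop_zero.symm List.drop_zero.symm ?_
          · omega
          · have b1 := pvSliceToLen (l1.drop (i1 + 1)) l1[i1]
            have b2 := pvSliceToLen (l2.drop (i2 + 1)) l2[i2]
            simp only [List.length_drop] at b1 b2
            omega
        rw [hsub]
        by_cases hr : altLoop
            (pvFuel (PySem.List.slice (l1.drop (i1 + 1)) none (some l1[i1]))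
              (PySem.List.slice (l2.drop (i2 + 1)) none (some l2[i2])))
            (PySem.List.slice (l1.drop (i1 + 1)) none (some l1[i1]))
            (PySem.List.slice (l2.drop (i2 + 1)) none (some l2[i2])) 0 0 [] = 1
        · rw [if_pos hr, hr]
          simpa using hwin
        · rw [if_neg hr]
          have hf : (altLoop
              (pvFuel (PySem.List.slice (l1.drop (i1 + 1)) none (some l1[i1]))
                (PySem.List.slice (l2.drop (i2 + 1)) none (some l2[i2])))
              (PySem.List.slice (l1.drop (i1 + 1)) none (some l1[i1]))
              (PySem.List.slice (l2.drop (i2 + 1)) none (some l2[i2])) 0 0 [] == 1) = false := by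
            simpa using hr
          rw [hf]
          simpa using hlose
      · rw [if_neg (fun hh => hg (hcond.mp hh)), if_neg hg]
        by_cases hlt : l2[i2] < l1[i1]
        · rw [if_pos hlt]
          simp only [hlt, decide_true]
          simpa using hwin
        · rw [if_neg hlt]
          simp only [hlt, decide_false]
          simpa using hlose

-- ===== VERDICT (by name: the statement is the Claim_ definition above) =====
theorem rec_game_spec : Claim_equal_rec_game := by
  unfold Claim_equal_rec_game Spec_rec_game
  intro deck1 deck2 _
  exact pvAgree (deck1.length + deck2.length) (pvFuel deck1 deck2)
    deck1 deck2 [] deck1 deck2 0 0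
    List.drop_zero.symm List.drop_zero.symm le_rfl
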